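-- pv_equiv track=rewrite | github.com/Anbiss/testing | testing.py | get_search_queries_stats
-- ===== SOURCE A (Python) =====
-- def get_search_queries_stats(queries):
--     a = len(queries)
--     rez = {}
--
--     for request in queries:
--         word = len(request.split())
--         if rez.get(word):
--             rez[word] += 1
--         else:
--             rez[word] = 1
--
--     return {f'Поисковых запросов из {x} слов(а)': round((y * 100) / a) for x, y in sorted(rez.items())}
-- ===== SOURCE B (Python) =====
-- def get_search_queries_stats(queries):
--     a = len(queries)
--     counts = sorted(len(q.split()) for q in queries)
--     res = {}
--     n = len(counts)
--     i = 0
--     while i < n: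
--         j = i
--         while j < n and counts[j] == counts[i]:
--             j += 1
--         res[f'Поисковых запросов из {counts[i]} слов(а)'] = round(((j - i) * 100) / a)
--         i = j
--     return res
-- ===== Notes on version B (the rewrite author's own statement) =====
-- stated objective: alternative
-- what changed: Replaces the hash-dict frequency accumulation followed by sorting the items with a sort of the raw word-counts followed by a single run-length scan over the sorted list; ascending runs reproduce the sorted-items order directly.
import Mathlib
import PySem

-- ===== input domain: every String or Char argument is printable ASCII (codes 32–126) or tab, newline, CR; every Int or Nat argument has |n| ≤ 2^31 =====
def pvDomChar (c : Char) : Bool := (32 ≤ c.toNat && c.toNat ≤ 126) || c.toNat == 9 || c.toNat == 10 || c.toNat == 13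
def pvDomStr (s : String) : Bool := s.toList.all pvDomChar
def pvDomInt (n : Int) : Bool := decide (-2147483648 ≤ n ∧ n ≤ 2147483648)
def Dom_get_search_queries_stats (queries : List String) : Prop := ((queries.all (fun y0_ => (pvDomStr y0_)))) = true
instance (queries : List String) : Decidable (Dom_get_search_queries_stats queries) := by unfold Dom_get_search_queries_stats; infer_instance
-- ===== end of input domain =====

-- B replaces A's hash-dict counting + sort of the items by sorting the raw word-counts and one
-- run-length scan over the sorted list (objective: alternative decomposition, same cost).

-- ===== PORT A =====
-- shared rendering of the f-string key f'Поисковых запросов из {x} слов(а)'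
def pvFmt (x : Int) : String := "Поисковых запросов из " ++ PySem.Int.toStr x ++ " слов(а)"

-- round((y*100)/a) for 0 < y ≤ a: exact integer round-half-to-even of the rational 100y/a.
-- (Exact model of the Python float expression on this range: 100y ≤ 100a fits a double exactly,
-- the quotient lies in (0,100] so the single division error < 2^-46, while a non-half-integer
-- quotient is at distance ≥ 1/(2a) ≥ 2^-32 from any rounding boundary; exact halves are
-- representable, so CPython's round matches half-to-even of the rational.)
def pvRound100 (y a : Int) : Int :=
  let q := PySem.Int.floordiv (y * 100) a
  let r := PySem.Int.mod (y * 100) a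
  if 2 * r < a then q
  else if a < 2 * r then q + 1
  else if PySem.Int.mod q 2 = 0 then q else q + 1

-- len(request.split())
def pvWordCount (q : String) : Int := ((PySem.Str.split₀ q).length : Int)

-- A's loop body: if rez.get(word): rez[word] += 1 else: rez[word] = 1
def pvAStep (d : PySem.Dict Int Int) (q : String) : PySem.Dict Int Int :=
  let w := pvWordCount q
  match d.get? w with
  | some v => if v ≠ 0 then d.insert w (v + 1) else d.insert w 1
  | none => d.insert w 1

def get_search_queries_stats (queries : List String) : List (String × Int) :=
  let a : Int := (queries.length : Int)
  let rez := queries.foldl pvAStep PySem.Dict.empty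
  (PySem.Dict.ofList ((PySem.List.sorted2 rez.items Prod.fst Prod.snd).map
      (fun p => (pvFmt p.1, pvRound100 p.2 a)))).items

-- ===== PORT B =====
-- outer while: one dict insertion per run of equal word-counts; inner while j advance = takeWhile,
-- moving i to j = dropWhile
def pvBLoop (a : Int) (counts : List Int) (res : PySem.Dict String Int) : PySem.Dict String Int :=
  match counts with
  | [] => res
  | x :: t =>
      pvBLoop a (t.dropWhile (fun y => y == x))
        (res.insert (pvFmt x) (pvRound100 (1 + ((t.takeWhile (fun y => y == x)).length : Int)) a))
termination_by counts.length
decreasing_by exact Nat.lt_succ_of_le (List.length_dropWhile_le _ _)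

def get_search_queries_stats_alt (queries : List String) : List (String × Int) :=
  let a : Int := (queries.length : Int)
  let counts := PySem.List.sorted (queries.map pvWordCount) (fun x => x)
  (pvBLoop a counts PySem.Dict.empty).items

-- ===== PRECONDITION & SPEC =====
def Spec_get_search_queries_stats (queries : List String) (out : List (String × Int)) : Prop := out = get_search_queries_stats_alt queries
instance (queries : List String) (out : List (String × Int)) : Decidable (Spec_get_search_queries_stats queries out) := by unfold Spec_get_search_queries_stats; infer_instance

-- ===== CLAIM (what is proved, stated in full; the proofs are below) =====
def Claim_equal_get_search_queries_stats : Prop := ∀ (queries : List String), Dom_get_search_queries_stats queries → Spec_get_search_queries_stats queries (get_search_queries_stats queries)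

-- ===== LEMMAS AND PROOFS =====

-- run-length grouping of a list: the (value, run length) pairs pvBLoop inserts, in order
def pvGroupRuns (s : List Int) : List (Int × Int) :=
  match s with
  | [] => []
  | x :: t => (x, 1 + ((t.takeWhile (fun y => y == x)).length : Int)) :: pvGroupRuns (t.dropWhile (fun y => y == x))
termination_by s.length
decreasing_by exact Nat.lt_succ_of_le (List.length_dropWhile_le _ _)

-- all dict values produced by A's loop stay positive
def pvPos (d : PySem.Dict Int Int) : Prop := ∀ k v, d.get? k = some v → 0 < v


theorem pvAStep_eq (d : PySem.Dict Int Int) (q : String) (h : pvPos d) :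
    pvAStep d q = d.insert (pvWordCount q) (d.getD (pvWordCount q) 0 + 1) := by
  unfold pvAStep
  cases hg : d.get? (pvWordCount q) with
  | none => simp [PySem.Dict.getD, hg]
  | some v =>
    have hv := h _ _ hg
    simp only [PySem.Dict.getD, hg, Option.getD_some]
    rw [if_pos (by omega : v ≠ 0)]

theorem pvPos_step (d : PySem.Dict Int Int) (q : String) (h : pvPos d) :
    pvPos (pvAStep d q) := by
  rw [pvAStep_eq d q h]
  intro k v hk
  by_cases hkw : k = pvWordCount q
  · subst hkw
    rw [PySem.Dict.get?_insert_self] at hk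
    cases hg : d.get? (pvWordCount q) with
    | none => rw [PySem.Dict.getD, hg] at hk; simp at hk; omega
    | some v' =>
      have := h _ _ hg
      rw [PySem.Dict.getD, hg] at hk; simp at hk; omega
  · rw [PySem.Dict.get?_insert_of_ne _ _ hkw] at hk
    exact h _ _ hk

theorem pvMemGroup (s : List Int) (k : Int) :
    k ∈ (pvGroupRuns s).map Prod.fst ↔ k ∈ s := by
  induction s using pvGroupRuns.induct with
  | case1 => simp [pvGroupRuns]
  | case2 x t ih =>
    rw [pvGroupRuns]
    simp only [List.map_cons, List.mem_cons, ih]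
    constructor
    · rintro (rfl | hk)
      · exact Or.inl rfl
      · exact Or.inr ((List.dropWhile_sublist _).mem hk)
    · rintro (rfl | hk)
      · exact Or.inl rfl
      · by_cases hx : k = x
        · exact Or.inl hx
        · refine Or.inr ?_
          have := List.takeWhile_append_dropWhile (p := fun y => y == x) (l := t)
          rw [← this] at hk
          rcases List.mem_append.mp hk with h1 | h2
          · exact absurd (by simpa using List.mem_takeWhile_imp h1) hx
          · exact h2

theorem pvDropWhile_gt (t : List Int) (x : Int) (hall : ∀ z ∈ t, x ≤ z)
    (hp : t.Pairwise (· ≤ ·)) : ∀ z ∈ t.dropWhile (fun y => y == x), x < z := by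
  induction t with
  | nil => simp
  | cons y t' ih =>
    rw [List.pairwise_cons] at hp
    by_cases hy : (y == x) = true
    · rw [List.dropWhile_cons, if_pos hy]
      exact ih (fun z hz => hall z (List.mem_cons_of_mem _ hz)) hp.2
    · rw [List.dropWhile_cons, if_neg hy]
      intro z hz
      have hxy : x < y := lt_of_le_of_ne (hall y List.mem_cons_self) (fun e => hy (by simp [e]))
      rcases List.mem_cons.mp hz with rfl | hz'
      · exact hxy
      · exact lt_of_lt_of_le hxy (hp.1 z hz')

theorem pvGroupPairwise (s : List Int) (hs : s.Pairwise (· ≤ ·)) :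
    (pvGroupRuns s).Pairwise (fun p q => p.1 < q.1) := by
  induction s using pvGroupRuns.induct with
  | case1 => simp [pvGroupRuns]
  | case2 x t ih =>
    rw [List.pairwise_cons] at hs
    rw [pvGroupRuns, List.pairwise_cons]
    constructor
    · intro q hq
      have hq1 : q.1 ∈ t.dropWhile (fun y => y == x) := by
        have := (pvMemGroup _ q.1).mp (List.mem_map_of_mem hq)
        exact this
      exact pvDropWhile_gt t x hs.1 hs.2 _ hq1
    · exact ih (List.Pairwise.sublist (List.dropWhile_sublist _) hs.2)

theorem pvGroupCount (s : List Int) (hs : s.Pairwise (· ≤ ·)) :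
    ∀ p ∈ pvGroupRuns s, p.2 = (s.count p.1 : Int) := by
  induction s using pvGroupRuns.induct with
  | case1 => simp [pvGroupRuns]
  | case2 x t ih =>
    rw [List.pairwise_cons] at hs
    rw [pvGroupRuns]
    intro p hp
    have hgt := pvDropWhile_gt t x hs.1 hs.2
    have hsplit : t = t.takeWhile (fun y => y == x) ++ t.dropWhile (fun y => y == x) :=
      (List.takeWhile_append_dropWhile).symm
    rcases List.mem_cons.mp hp with rfl | hp'
    · have h1 : (t.takeWhile (fun y => y == x)).count x = (t.takeWhile (fun y => y == x)).length :=
        List.count_eq_length.mpr (fun b hb => by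
          have hbx := List.mem_takeWhile_imp hb
          simp only [beq_iff_eq] at hbx
          exact hbx.symm)
      have h2 : (t.dropWhile (fun y => y == x)).count x = 0 :=
        List.count_eq_zero.mpr (fun hin => lt_irrefl x (hgt x hin))
      have hc : t.count x = (t.takeWhile (fun y => y == x)).length := by
        conv_lhs => rw [hsplit]
        rw [List.count_append, h1, h2]
        omega
      show (1 : Int) + _ = _
      
      rw [List.count_cons_self, hc]
      push_cast
      ring
    · have hp1 : p.1 ∈ t.dropWhile (fun y => y == x) :=
        (pvMemGroup _ p.1).mp (List.mem_map_of_mem hp')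
      have hne : p.1 ≠ x := fun e => lt_irrefl x (e ▸ hgt _ hp1)
      have h1 : (t.takeWhile (fun y => y == x)).count p.1 = 0 :=
        List.count_eq_zero.mpr (fun hin => hne (by simpa using List.mem_takeWhile_imp hin))
      have hc : t.count p.1 = (t.dropWhile (fun y => y == x)).count p.1 := by
        conv_lhs => rw [hsplit]
        rw [List.count_append, h1]
        omega
      rw [ih (List.Pairwise.sublist (List.dropWhile_sublist _) hs.2) p hp',
        List.count_cons_of_ne (Ne.symm hne), ← hc]


theorem pvInsertBy_congr (b1 b2 : (Int × Int) → (Int × Int) → Bool) (x : Int × Int)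
    (acc : List (Int × Int)) (h : ∀ p ∈ x :: acc, ∀ q ∈ x :: acc, b1 p q = b2 p q) :
    PySem.List.insertBy b1 x acc = PySem.List.insertBy b2 x acc := by
  induction acc with
  | nil => rfl
  | cons y ys ih =>
    show (if b1 x y then _ else _) = (if b2 x y then _ else _)
    rw [h x (by simp) y (by simp)]
    by_cases hb : b2 x y = true
    · rw [if_pos hb, if_pos hb]
    · rw [if_neg hb, if_neg hb]
      have := ih (fun p hp q hq => h p (by simp at hp ⊢; tauto) q (by simp at hq ⊢; tauto))
      rw [this]

theorem pvFoldl_insertBy_congr (b1 b2 : (Int × Int) → (Int × Int) → Bool) (S : List (Int × Int))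
    (H : ∀ p ∈ S, ∀ q ∈ S, b1 p q = b2 p q) :
    ∀ (xs acc : List (Int × Int)), (∀ z ∈ xs, z ∈ S) → (∀ z ∈ acc, z ∈ S) →
      xs.foldl (fun acc x => PySem.List.insertBy b1 x acc) acc
        = xs.foldl (fun acc x => PySem.List.insertBy b2 x acc) acc := by
  intro xs
  induction xs with
  | nil => intro acc _ _; rfl
  | cons x xs ih =>
    intro acc hxs hacc
    simp only [List.foldl_cons]
    have hx : x ∈ S := hxs x (by simp)
    have hmem : ∀ p ∈ x :: acc, p ∈ S := by
      intro p hp; rcases List.mem_cons.mp hp with rfl | hp'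
      · exact hx
      · exact hacc p hp'
    rw [pvInsertBy_congr b1 b2 x acc (fun p hp q hq => H p (hmem p hp) q (hmem q hq))]
    refine ih _ (fun z hz => hxs z (by simp [hz])) ?_
    intro z hz
    rw [PySem.List.mem_insertBy] at hz
    rcases hz with rfl | hz'
    · exact hx
    · exact hacc z hz'

theorem pvSorted2_eq_sorted (xs : List (Int × Int)) (h : (xs.map Prod.fst).Nodup) :
    PySem.List.sorted2 xs Prod.fst Prod.snd = PySem.List.sorted xs Prod.fst := by
  rw [PySem.List.sorted_eq_foldl_insertBy]
  show xs.foldl (fun acc x => PySem.List.insertBy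
      (fun a b => decide (a.1 < b.1) || !decide (b.1 < a.1) && decide (a.2 < b.2)) x acc) []
    = _
  refine pvFoldl_insertBy_congr _ _ xs ?_ xs [] (fun z hz => hz) (by simp)
  intro p hp q hq
  by_cases hpq : p.1 = q.1
  · have : p = q := List.inj_on_of_nodup_map h hp hq hpq
    subst this
    simp
  · rcases lt_or_gt_of_ne hpq with hlt | hgt
    · simp [hlt, not_lt_of_gt hlt]
    · simp [hgt, not_lt_of_gt hgt]

theorem pvFoldA (queries : List String) :
    queries.foldl pvAStep PySem.Dict.empty = PySem.Dict.counter (queries.map pvWordCount) := by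
  rw [← PySem.Dict.foldl_insert_getD_add_one_eq_counter, List.foldl_map]
  have key : ∀ (qs : List String) (d : PySem.Dict Int Int), pvPos d →
      qs.foldl pvAStep d = qs.foldl (fun d q => d.insert (pvWordCount q) (d.getD (pvWordCount q) 0 + 1)) d := by
    intro qs
    induction qs with
    | nil => intro d _; rfl
    | cons q qs ih =>
      intro d hd
      simp only [List.foldl_cons]
      rw [pvAStep_eq d q hd, ih _ (by rw [← pvAStep_eq d q hd]; exact pvPos_step d q hd)]
  exact key queries PySem.Dict.empty (by intro k v hk; simp [PySem.Dict.get?_empty] at hk)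

theorem pvBLoop_eq (a : Int) (cs : List Int) :
    ∀ res, pvBLoop a cs res =
      ((pvGroupRuns cs).map (fun p => (pvFmt p.1, pvRound100 p.2 a))).foldl
        (fun d p => d.insert p.1 p.2) res := by
  induction cs using pvGroupRuns.induct with
  | case1 => intro res; simp [pvBLoop, pvGroupRuns]
  | case2 x t ih =>
    intro res
    rw [pvGroupRuns, pvBLoop, List.map_cons, List.foldl_cons, ih]

theorem pvMain (ws : List Int) :
    PySem.List.sorted2 (PySem.Dict.counter ws).items Prod.fst Prod.snd
      = pvGroupRuns (PySem.List.sorted ws (fun x => x)) := by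
  have hs : (PySem.List.sorted ws (fun x => x)).Pairwise (· ≤ ·) :=
    PySem.List.sorted_pairwise ws (fun x => x)
  have hperm_s : (PySem.List.sorted ws (fun x => x)).Perm ws := PySem.List.sorted_perm ws _ false
  have hpw := pvGroupPairwise _ hs
  have hGfst_nodup : ((pvGroupRuns (PySem.List.sorted ws (fun x => x))).map Prod.fst).Nodup :=
    List.Pairwise.map _ (fun p q (h : p.1 < q.1) => ne_of_lt h) hpw
  have hGexp : pvGroupRuns (PySem.List.sorted ws (fun x => x))
      = ((pvGroupRuns (PySem.List.sorted ws (fun x => x))).map Prod.fst).map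
          (fun k => (k, (ws.count k : Int))) := by
    rw [List.map_map]
    conv_lhs => rw [← List.map_id (pvGroupRuns (PySem.List.sorted ws (fun x => x)))]
    apply List.map_congr_left
    intro p hp
    have h2 := pvGroupCount _ hs p hp
    have h3 := hperm_s.count_eq p.1
    show p = (p.1, (ws.count p.1 : Int))
    rw [← h3, ← h2]
  have hkeysperm : ((pvGroupRuns (PySem.List.sorted ws (fun x => x))).map Prod.fst).Perm
      (PySem.Set.ofList ws) := by
    rw [List.perm_ext_iff_of_nodup hGfst_nodup (PySem.Set.nodup_ofList ws)]
    intro k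
    rw [pvMemGroup _ k, PySem.Set.mem_ofList, PySem.List.mem_sorted]
  have hperm : (pvGroupRuns (PySem.List.sorted ws (fun x => x))).Perm
      ((PySem.Dict.counter ws).items) := by
    rw [PySem.Dict.items_counter]
    conv_lhs => rw [hGexp]
    exact hkeysperm.map _
  have hnodupI : (((PySem.Dict.counter ws).items).map Prod.fst).Nodup := by
    have := PySem.Dict.nodup_keys_counter (κ := Int) ws
    simpa [PySem.Dict.keys] using this
  rw [pvSorted2_eq_sorted _ hnodupI]
  exact PySem.List.sorted_eq_of_perm_of_pairwise_lt _ _ Prod.fst hperm hpw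

-- ===== VERDICT (by name: the statement is the Claim_ definition above) =====
theorem get_search_queries_stats_spec : Claim_equal_get_search_queries_stats := by
  intro queries _
  unfold Spec_get_search_queries_stats get_search_queries_stats get_search_queries_stats_alt
  simp only [pvFoldA, pvBLoop_eq, pvMain]
  rfl
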